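-- pv_equiv track=rewrite | github.com/x-rune-x/rosalind_ORF | main.py | protein_strings
-- ===== SOURCE A (Python) =====
-- def protein_strings(prot_seq):
--     prot_strings = []
--     # Go through each amino acid residue in the sequence and check if it is an M.
--     for amino_acid in range(len(prot_seq)):
--         # When an M is found, read through the sequence from the position of the M and adding the following residues to
--         # a string.
--         if prot_seq[amino_acid] == "M":
--             prot_string = ''
--             # If a stop is encountered, add the string to a list of protein coding strings, exit the loop and resume
--             # searching the sequence for methionines.
--             for aa in range(amino_acid, len(prot_seq)):
--                 if prot_seq[aa] != "stop":
--                     prot_string += prot_seq[aa]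
--                 else:
--                     prot_strings.append(prot_string)
--                     break
--
--     # Problem calls for distinct protein strings
--     prot_strings = list(dict.fromkeys(prot_strings))
--     return prot_strings
-- ===== SOURCE B (Python) =====
-- def protein_strings(prot_seq):
--     # One backward pass: maintain the protein running from the current position
--     # to the next stop (None if no stop ahead); collect at every 'M'.
--     cur = None
--     found = []
--     for t in reversed(prot_seq):
--         if t == "stop":
--             cur = ""
--         elif cur is not None:
--             cur = t + cur
--         if t == "M" and cur is not None:
--             found.append(cur)
--     found.reverse()
--     return list(dict.fromkeys(found))
-- ===== Notes on version B (the rewrite author's own statement) =====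
-- stated objective: alternative
-- what changed: Replaced the per-M forward re-scan with a single backward pass that maintains the running protein up to the next stop and collects it at every M, then dedups once.
import Mathlib
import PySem

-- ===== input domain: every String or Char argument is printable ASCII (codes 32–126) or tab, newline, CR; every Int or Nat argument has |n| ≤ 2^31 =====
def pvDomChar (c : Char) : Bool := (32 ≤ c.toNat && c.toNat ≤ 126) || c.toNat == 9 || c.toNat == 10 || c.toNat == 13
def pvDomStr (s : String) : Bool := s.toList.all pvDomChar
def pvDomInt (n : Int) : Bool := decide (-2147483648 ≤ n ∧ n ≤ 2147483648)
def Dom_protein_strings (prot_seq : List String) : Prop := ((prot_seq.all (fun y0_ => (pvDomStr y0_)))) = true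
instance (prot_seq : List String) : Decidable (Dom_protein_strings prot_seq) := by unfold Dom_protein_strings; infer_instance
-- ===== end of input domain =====

-- B replaces A's per-M forward re-scan by one backward pass that carries the running
-- protein up to the next stop; same return value, objective: alternative decomposition.

-- ===== PORT A =====
-- inner loop 'for aa in range(amino_acid, len(prot_seq))' with break:
-- returns some s (the string to append) on break at a "stop", none if the loop runs out.
-- indices come from range(amino_acid, len) so they are in range and pyGetD is exact.
def psInner (seq : List String) : List Int → String → Option String
  | [], _ => none
  | aa :: rest, s =>
    if PySem.List.pyGetD seq aa "" ≠ "stop" then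
      psInner seq rest (s ++ PySem.List.pyGetD seq aa "")
    else some s

def protein_strings (prot_seq : List String) : List String :=
  let n : Int := PySem.List.len prot_seq
  let prot_strings :=
    (PySem.List.pyRange 0 n 1).foldl (fun acc amino_acid =>
      if PySem.List.pyGetD prot_seq amino_acid "" = "M" then
        match psInner prot_seq (PySem.List.pyRange amino_acid n 1) "" with
        | some s => acc ++ [s]
        | none => acc
      else acc) []
  PySem.List.dedup prot_strings

-- ===== PORT B =====
-- one step of the backward pass: state = (cur : protein from here to next stop, found)
def psStep (st : Option String × List String) (t : String) : Option String × List String :=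
  let cur : Option String :=
    if t = "stop" then some ""
    else match st.1 with
         | some c => some (t ++ c)
         | none => none
  let found :=
    if t = "M" then
      match cur with
      | some c => st.2 ++ [c]
      | none => st.2
    else st.2
  (cur, found)

def protein_strings_alt (prot_seq : List String) : List String :=
  let st := prot_seq.reverse.foldl psStep (none, [])
  PySem.List.dedup st.2.reverse

-- ===== PRECONDITION & SPEC =====
def Spec_protein_strings (prot_seq : List String) (out : List String) : Prop := out = protein_strings_alt prot_seq
instance (prot_seq : List String) (out : List String) : Decidable (Spec_protein_strings prot_seq out) := by unfold Spec_protein_strings; infer_instance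

-- ===== CLAIM (what is proved, stated in full; the proofs are below) =====
def Claim_equal_protein_strings : Prop := ∀ (prot_seq : List String), Dom_protein_strings prot_seq → Spec_protein_strings prot_seq (protein_strings prot_seq)

-- ===== LEMMAS AND PROOFS =====

-- reference: the protein from this position up to the next stop (none if no stop ahead)
def curOf : List String → Option String
  | [] => none
  | t :: rest => if t = "stop" then some "" else (curOf rest).map (fun c => t ++ c)

-- reference: the proteins emitted, in position order, before dedup
def emits : List String → List String
  | [] => []
  | t :: rest =>
    (if t = "M" then
       match curOf (t :: rest) with
       | some c => [c]
       | none => []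
     else []) ++ emits rest

theorem psInner_spec (seq : List String) : ∀ (m k : Nat) (s : String), seq.length - k = m →
    psInner seq (PySem.List.pyRange (k : Int) (PySem.List.len seq) 1) s
      = (curOf (seq.drop k)).map (fun c => s ++ c) := by
  intro m
  induction m with
  | zero =>
    intro k s h
    have hk : seq.length ≤ k := by omega
    rw [PySem.List.pyRange_one_eq_nil (by simp; exact_mod_cast hk),
        List.drop_eq_nil_of_le hk]
    rfl
  | succ m ih =>
    intro k s h
    have hk : k < seq.length := by omega
    have hdrop := List.drop_eq_getElem_cons hk
    have hcons : PySem.List.pyRange (k : Int) (PySem.List.len seq) 1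
        = (k : Int) :: PySem.List.pyRange ((k : Int) + 1) (PySem.List.len seq) 1 :=
      PySem.List.pyRange_one_cons (by simp; exact_mod_cast hk)
    rw [hcons, hdrop]
    have hget : PySem.List.pyGetD seq ((k : Nat) : Int) "" = seq[k] := by
      rw [PySem.List.pyGetD_natCast]
      exact List.getD_eq_getElem seq "" hk
    have hcast : ((k : Int) + 1) = (((k + 1 : Nat)) : Int) := by push_cast; ring
    show (if PySem.List.pyGetD seq (k : Int) "" ≠ "stop" then
            psInner seq (PySem.List.pyRange ((k : Int) + 1) (PySem.List.len seq) 1)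
              (s ++ PySem.List.pyGetD seq (k : Int) "")
          else some s)
        = (curOf (seq[k] :: seq.drop (k + 1))).map (fun c => s ++ c)
    rw [hget, hcast, ih (k + 1) (s ++ seq[k]) (by omega)]
    by_cases hstop : seq[k] = "stop"
    · simp [curOf, hstop]
    · simp [curOf, hstop]
      cases curOf (seq.drop (k + 1)) <;> simp [String.append_assoc]

theorem psOuter_spec (seq : List String) : ∀ (m k : Nat) (acc : List String), seq.length - k = m →
    (PySem.List.pyRange (k : Int) (PySem.List.len seq) 1).foldl (fun acc amino_acid =>
      if PySem.List.pyGetD seq amino_acid "" = "M" then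
        match psInner seq (PySem.List.pyRange amino_acid (PySem.List.len seq) 1) "" with
        | some s => acc ++ [s]
        | none => acc
      else acc) acc = acc ++ emits (seq.drop k) := by
  intro m
  induction m with
  | zero =>
    intro k acc h
    have hk : seq.length ≤ k := by omega
    rw [PySem.List.pyRange_one_eq_nil (by simp; exact_mod_cast hk),
        List.drop_eq_nil_of_le hk]
    simp [emits]
  | succ m ih =>
    intro k acc h
    have hk : k < seq.length := by omega
    have hdrop := List.drop_eq_getElem_cons hk
    have hcons : PySem.List.pyRange (k : Int) (PySem.List.len seq) 1
        = (k : Int) :: PySem.List.pyRange ((k : Int) + 1) (PySem.List.len seq) 1 :=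
      PySem.List.pyRange_one_cons (by simp; exact_mod_cast hk)
    have hget : PySem.List.pyGetD seq ((k : Nat) : Int) "" = seq[k] := by
      rw [PySem.List.pyGetD_natCast]
      exact List.getD_eq_getElem seq "" hk
    have hcast : ((k : Int) + 1) = (((k + 1 : Nat)) : Int) := by push_cast; ring
    have hinner := psInner_spec seq (seq.length - k) k "" rfl
    rw [hcons, List.foldl_cons, hget, hinner, hdrop]
    by_cases hm : seq[k] = "M"
    · cases hcur : curOf (seq.drop k) with
      | none =>
        rw [hdrop] at hcur
        simp only [hcur, Option.map_none]
        rw [if_pos hm, hcast, ih (k + 1) acc (by omega)]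
        rw [hm] at hcur
        simp [emits, hm, hcur]
      | some c =>
        rw [hdrop] at hcur
        simp only [hcur, Option.map_some, String.empty_append]
        rw [if_pos hm, hcast, ih (k + 1) (acc ++ [c]) (by omega)]
        rw [hm] at hcur
        simp [emits, hm, hcur]
    · rw [if_neg hm, hcast, ih (k + 1) acc (by omega)]
      simp [emits, hm]

theorem protein_strings_eq_emits (seq : List String) :
    protein_strings seq = PySem.List.dedup (emits seq) := by
  show PySem.List.dedup _ = _
  rw [show ((0 : Int) = ((0 : Nat) : Int)) from rfl,
      psOuter_spec seq seq.length 0 [] (by omega)]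
  simp

theorem psFold_spec (seq : List String) :
    seq.reverse.foldl psStep (none, []) = (curOf seq, (emits seq).reverse) := by
  rw [List.foldl_reverse]
  induction seq with
  | nil => rfl
  | cons t rest ih =>
    rw [List.foldr_cons, ih]
    by_cases hs : t = "stop"
    · have hm : ¬ t = "M" := by rw [hs]; decide
      simp [psStep, emits, curOf, hs]
    · by_cases hm : t = "M" <;>
        cases hcur : curOf rest <;>
          simp [psStep, emits, curOf, hs, hm, hcur]

theorem alt_eq_emits (seq : List String) :
    protein_strings_alt seq = PySem.List.dedup (emits seq) := by
  show PySem.List.dedup _ = _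
  rw [psFold_spec]
  simp

-- ===== VERDICT (by name: the statement is the Claim_ definition above) =====
theorem protein_strings_spec : Claim_equal_protein_strings := by
  intro seq _
  unfold Spec_protein_strings
  rw [protein_strings_eq_emits, alt_eq_emits]
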